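-- pv_equiv track=rewrite | github.com/AdamMC-GL/AdamMC | opdracht3-AI.py | count
-- ===== SOURCE A (Python) =====
-- def count(lijst, x):
--     xcount = 0
--     alleen_1_en_0 = True
--     alleen_1_en_0_voeldoet_aan_eisen = True
--
--     for check in lijst:  # check of de lijst alleen van 1'en of 0'en bestaan
--         if check != 0 and check != 1:
--
--             alleen_1_en_0 = False
--             break
--     for number in lijst:
--         if number == x:
--             xcount += 1
--
--     if alleen_1_en_0:
--         one_count = 0
--         zero_count = 0
--         for number in lijst:
--             if number == 1:
--                 one_count += 1
--             if number == 0: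
--                 zero_count += 1
--
--         if zero_count > 12 or one_count < zero_count:
--             alleen_1_en_0_voeldoet_aan_eisen = False
--
--     return alleen_1_en_0_voeldoet_aan_eisen, xcount, alleen_1_en_0
-- ===== SOURCE B (Python) =====
-- def count(lijst, x):
--     xcount = 0
--     ones = 0
--     zeros = 0
--     binary = True
--     for v in lijst:
--         if v == x:
--             xcount += 1
--         if v == 1:
--             ones += 1
--         elif v == 0:
--             zeros += 1
--         else:
--             binary = False
--     voldoet = not (binary and (zeros > 12 or ones < zeros))
--     return voldoet, xcount, binary
-- ===== Notes on version B (the rewrite author's own statement) =====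
-- stated objective: simpler
-- what changed: B fuses A's three sequential loops (plus break-based binary scan) into one pass maintaining xcount, one/zero counts and a binary flag, then derives the verdict from the final counts in a single boolean expression.
import Mathlib
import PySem

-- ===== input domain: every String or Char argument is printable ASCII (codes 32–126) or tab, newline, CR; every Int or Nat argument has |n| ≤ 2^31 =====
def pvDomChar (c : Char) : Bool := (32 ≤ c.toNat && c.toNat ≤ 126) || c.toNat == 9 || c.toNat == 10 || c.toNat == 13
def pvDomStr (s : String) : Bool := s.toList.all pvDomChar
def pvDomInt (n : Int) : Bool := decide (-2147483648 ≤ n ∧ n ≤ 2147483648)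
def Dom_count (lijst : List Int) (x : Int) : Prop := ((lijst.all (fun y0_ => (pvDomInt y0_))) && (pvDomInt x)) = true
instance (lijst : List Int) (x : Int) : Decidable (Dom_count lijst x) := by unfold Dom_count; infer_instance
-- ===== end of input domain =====

-- B replaces A's break-scan plus three sequential counting loops by one fused pass
-- maintaining all counters and the binary flag, deriving the verdict from the final counts (objective: simpler).

-- ===== PORT A =====
-- first loop of A: scan with break, False as soon as an element is neither 0 nor 1
def checkBinA : List Int → Bool
  | [] => true
  | c :: t => if c ≠ 0 ∧ c ≠ 1 then false else checkBinA t

def count (lijst : List Int) (x : Int) : Bool × Int × Bool :=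
  let alleen_1_en_0 := checkBinA lijst
  let xcount := lijst.foldl (fun acc n => if n = x then acc + 1 else acc) (0 : Int)
  let voldoet :=
    if alleen_1_en_0 then
      let one_count := lijst.foldl (fun a n => if n = 1 then a + 1 else a) (0 : Int)
      let zero_count := lijst.foldl (fun a n => if n = 0 then a + 1 else a) (0 : Int)
      if zero_count > 12 ∨ one_count < zero_count then false else true
    else true
  (voldoet, xcount, alleen_1_en_0)

-- ===== PORT B =====
-- one step of B's single fused loop: state (xcount, ones, zeros, binary)
def stepB (x : Int) (s : Int × Int × Int × Bool) (v : Int) : Int × Int × Int × Bool :=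
  let xc := if v = x then s.1 + 1 else s.1
  if v = 1 then (xc, s.2.1 + 1, s.2.2.1, s.2.2.2)
  else if v = 0 then (xc, s.2.1, s.2.2.1 + 1, s.2.2.2)
  else (xc, s.2.1, s.2.2.1, false)

def count_alt (lijst : List Int) (x : Int) : Bool × Int × Bool :=
  let s := lijst.foldl (stepB x) (0, 0, 0, true)
  (!(s.2.2.2 && (decide (s.2.2.1 > 12) || decide (s.2.1 < s.2.2.1))), s.1, s.2.2.2)

-- ===== PRECONDITION & SPEC =====
def Spec_count (lijst : List Int) (x : Int) (out : Bool × Int × Bool) : Prop := out = count_alt lijst x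
instance (lijst : List Int) (x : Int) (out : Bool × Int × Bool) : Decidable (Spec_count lijst x out) := by unfold Spec_count; infer_instance

-- ===== CLAIM (what is proved, stated in full; the proofs are below) =====
def Claim_equal_count : Prop := ∀ (lijst : List Int) (x : Int), Dom_count lijst x → Spec_count lijst x (count lijst x)

-- ===== LEMMAS AND PROOFS =====
-- B's fused fold computes exactly A's separate counters and break-scan flag
theorem foldB_eq (x : Int) (l : List Int) : ∀ (xc on ze : Int) (b : Bool),
    l.foldl (stepB x) (xc, on, ze, b) =
      (l.foldl (fun acc n => if n = x then acc + 1 else acc) xc,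
       l.foldl (fun a n => if n = 1 then a + 1 else a) on,
       l.foldl (fun a n => if n = 0 then a + 1 else a) ze,
       b && checkBinA l) := by
  induction l with
  | nil => intro xc on ze b; simp [checkBinA]
  | cons v t ih =>
    intro xc on ze b
    simp only [List.foldl_cons, stepB, checkBinA]
    by_cases h1 : v = 1
    · subst h1; simp [ih]
    · by_cases h0 : v = 0
      · subst h0; simp [h1, ih]
      · simp [h1, h0, ih]

-- ===== VERDICT (by name: the statement is the Claim_ definition above) =====
theorem count_spec : Claim_equal_count := by
  intro lijst x _
  unfold Spec_count count count_alt
  rw [foldB_eq]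
  by_cases hb : checkBinA lijst
  · simp only [hb, if_true, Bool.true_and]
    split_ifs with h <;> simp <;> omega
  · simp [hb]
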